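-- pv_equiv track=rewrite | github.com/Sandra1007/Euler-graph-matrix-of-incidence-adjancency-matrix | curkovic_sandra_drugi.py | Odvoji_Brojeve
-- ===== SOURCE A (Python) =====
-- def Odvoji_Brojeve(niz):
--     i=0
--     niz1=[]
--     niz2=[]
--     d=len(niz)
--     for x in niz:
--         if(i<=d-1 and i>=0):
--             niz1.append(int(niz[i][0])) #stavi u prvi niz prvi broj
--             niz2.append(int(niz[i][1])) #stavi u niz drugi broj iz liste
--             i=i+1 #povecaj i
--
--     return niz1,niz2
-- ===== SOURCE B (Python) =====
-- def Odvoji_Brojeve(niz):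
--     if not niz:
--         return [], []
--     cols = list(zip(*niz))
--     return [int(x) for x in cols[0]], [int(x) for x in cols[1]]
-- ===== Notes on version B (the rewrite author's own statement) =====
-- stated objective: idiomatic
-- what changed: B transposes the pair list once with zip(*niz) and converts the two columns, instead of A's indexed row loop appending element [0] and [1] of each pair.
import Mathlib
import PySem

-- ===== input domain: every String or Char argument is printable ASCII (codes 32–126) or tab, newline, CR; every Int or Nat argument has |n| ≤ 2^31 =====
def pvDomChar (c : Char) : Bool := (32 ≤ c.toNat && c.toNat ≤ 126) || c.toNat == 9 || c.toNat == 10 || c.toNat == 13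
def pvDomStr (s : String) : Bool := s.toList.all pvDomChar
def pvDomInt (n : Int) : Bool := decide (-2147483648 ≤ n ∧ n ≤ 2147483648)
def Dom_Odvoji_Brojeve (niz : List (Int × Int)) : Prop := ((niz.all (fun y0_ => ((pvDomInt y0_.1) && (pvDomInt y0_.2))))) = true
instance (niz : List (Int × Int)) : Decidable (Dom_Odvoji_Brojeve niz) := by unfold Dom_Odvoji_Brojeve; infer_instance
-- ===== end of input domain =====

-- B transposes the pair list once (zip(*niz)) instead of A's indexed row loop; objective: idiomatic.


-- ===== PORT A =====
-- loop body of A: if i <= d-1 and i >= 0, append niz[i][0] / niz[i][1] and bump i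
def pvStepA (niz : List (Int × Int)) (st : Int × List Int × List Int) (_x : Int × Int) :
    Int × List Int × List Int :=
  if st.1 ≤ (niz.length : Int) - 1 ∧ 0 ≤ st.1 then
    match PySem.List.pyGet? niz st.1 with
    | some p => (st.1 + 1, st.2.1 ++ [p.1], st.2.2 ++ [p.2])
    | none => st
  else st

def Odvoji_Brojeve (niz : List (Int × Int)) : List Int × List Int :=
  let s := niz.foldl (pvStepA niz) (0, [], [])
  (s.2.1, s.2.2)

-- ===== PORT B =====
-- zip(*niz): empty guard, then the two columns of the transpose
def Odvoji_Brojeve_alt (niz : List (Int × Int)) : List Int × List Int :=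
  if niz = [] then ([], [])
  else (niz.map Prod.fst, niz.map Prod.snd)

-- ===== PRECONDITION & SPEC =====
def Spec_Odvoji_Brojeve (niz : List (Int × Int)) (out : List Int × List Int) : Prop := out = Odvoji_Brojeve_alt niz
instance (niz : List (Int × Int)) (out : List Int × List Int) : Decidable (Spec_Odvoji_Brojeve niz out) := by unfold Spec_Odvoji_Brojeve; infer_instance

-- ===== CLAIM (what is proved, stated in full; the proofs are below) =====
def Claim_equal_Odvoji_Brojeve : Prop := ∀ (niz : List (Int × Int)), Dom_Odvoji_Brojeve niz → Spec_Odvoji_Brojeve niz (Odvoji_Brojeve niz)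

-- ===== LEMMAS AND PROOFS =====

theorem pvLoopA (niz : List (Int × Int)) :
    ∀ (ys : List (Int × Int)) (k : Nat) (n1 n2 : List Int),
      niz.drop k = ys → k ≤ niz.length →
      ys.foldl (pvStepA niz) ((k : Int), n1, n2)
        = ((niz.length : Int), n1 ++ ys.map Prod.fst, n2 ++ ys.map Prod.snd) := by
  intro ys
  induction ys with
  | nil =>
    intro k n1 n2 hdrop hk
    have : niz.length ≤ k := by
      by_contra h
      have := List.drop_eq_nil_iff.mp hdrop
      omega
    simp [List.foldl]
    omega
  | cons y tl ih =>
    intro k n1 n2 hdrop hk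
    have hlt : k < niz.length := by
      by_contra h
      have : niz.drop k = [] := List.drop_eq_nil_iff.mpr (by omega)
      rw [this] at hdrop; cases hdrop
    have hget : niz[k]? = some y := by
      have h0 : (niz.drop k)[0]? = some y := by rw [hdrop]; rfl
      rw [List.getElem?_drop] at h0
      simpa using h0
    have hdrop' : niz.drop (k + 1) = tl := by
      have : niz.drop (k + 1) = (niz.drop k).drop 1 := by
        rw [List.drop_drop]
      rw [this, hdrop]; rfl
    have hstep : pvStepA niz ((k : Int), n1, n2) y
        = (((k + 1 : Nat) : Int), n1 ++ [y.1], n2 ++ [y.2]) := by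
      unfold pvStepA
      rw [if_pos (by constructor <;> [push_cast; skip] <;> omega)]
      simp [PySem.List.pyGet?_natCast, hget]
    rw [List.foldl_cons, hstep, ih (k + 1) _ _ hdrop' (by omega)]
    simp

theorem Odvoji_Brojeve_eq (niz : List (Int × Int)) :
    Odvoji_Brojeve niz = Odvoji_Brojeve_alt niz := by
  cases niz with
  | nil => rfl
  | cons y tl =>
    unfold Odvoji_Brojeve Odvoji_Brojeve_alt
    have h := pvLoopA (y :: tl) (y :: tl) 0 [] [] rfl (by omega)
    simp only [Nat.cast_zero] at h
    rw [h]
    simp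

-- ===== VERDICT (by name: the statement is the Claim_ definition above) =====
theorem Odvoji_Brojeve_spec : Claim_equal_Odvoji_Brojeve := by
  intro niz _
  exact (Odvoji_Brojeve_eq niz).symm ▸ rfl
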